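-- pv_equiv track=rewrite | github.com/quantum-pulse/pconf | test/lib/compilermgr.py | __unmarshalize
-- ===== SOURCE A (Python) =====
-- def __unmarshalize(_strlist,_echar=''):
--     token=' '
--     lBuffer=""
--     for index,element in enumerate(_strlist):
--         if('-' not in element):
--             if(index < len(_strlist)-1):
--                 lBuffer+='-'+_echar+element+token
--             else:
--                 lBuffer+='-'+_echar+element
--         else:
--             if(index < len(_strlist)-1):
--                 lBuffer+=element+token
--             else:
--                 lBuffer+=element
--
--     return lBuffer
-- ===== SOURCE B (Python) =====
-- def __unmarshalize(_strlist, _echar=''):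
--     # Divide and conquer: unmarshalize each half recursively and glue the two
--     # results with a single space.  Both halves are nonempty whenever we split,
--     # and a one-element result is never empty, so exactly one separator goes
--     # between any two adjacent elements; no index/last-element bookkeeping.
--     def rec(xs):
--         if not xs:
--             return ""
--         if len(xs) == 1:
--             e = xs[0]
--             return e if '-' in e else '-' + _echar + e
--         mid = len(xs) // 2
--         return rec(xs[:mid]) + ' ' + rec(xs[mid:])
--     return rec(_strlist)
-- ===== Notes on version B (the rewrite author's own statement) =====
-- stated objective: alternative
-- what changed: B replaces A's indexed left-to-right buffer accumulation (with an explicit last-element branch) by a divide-and-conquer recursion: each half of the list is unmarshalized recursively and the two results are glued with one space, correct because single-element results are never empty.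
import Mathlib
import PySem

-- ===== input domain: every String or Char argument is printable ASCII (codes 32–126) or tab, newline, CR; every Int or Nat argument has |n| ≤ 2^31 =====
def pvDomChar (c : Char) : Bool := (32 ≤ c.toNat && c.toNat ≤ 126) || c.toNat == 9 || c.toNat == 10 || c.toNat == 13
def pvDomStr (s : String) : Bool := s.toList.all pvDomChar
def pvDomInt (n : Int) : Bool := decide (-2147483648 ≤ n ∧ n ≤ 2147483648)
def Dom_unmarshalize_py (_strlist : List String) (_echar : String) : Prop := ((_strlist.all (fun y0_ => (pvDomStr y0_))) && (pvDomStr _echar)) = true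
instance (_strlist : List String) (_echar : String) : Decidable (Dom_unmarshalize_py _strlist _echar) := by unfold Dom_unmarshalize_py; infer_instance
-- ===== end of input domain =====

-- B is a divide-and-conquer recursion (split, recurse on both halves, glue with one space),
-- replacing A's indexed left-to-right accumulation with a last-element branch; objective: alternative.


-- ===== PORT A =====
-- Port of __unmarshalize: indexed loop over enumerate, appending to a string buffer,
-- with an explicit "not the last element" branch that appends the separator token.
def unmarshalize_py (_strlist : List String) (_echar : String) : String :=
  let token : String := " "
  (PySem.List.enumerate _strlist 0).foldl
    (fun lBuffer ie =>
      if PySem.Str.isIn "-" ie.2 = false then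
        if ie.1 < (_strlist.length : Int) - 1 then
          lBuffer ++ ("-" ++ _echar ++ ie.2 ++ token)
        else
          lBuffer ++ ("-" ++ _echar ++ ie.2)
      else
        if ie.1 < (_strlist.length : Int) - 1 then
          lBuffer ++ (ie.2 ++ token)
        else
          lBuffer ++ ie.2)
    ""

-- ===== PORT B =====
-- B's helper rec: empty list -> "", singleton -> its transformed element,
-- otherwise split at the midpoint, recurse on both halves, glue with one space.
def pvAltRec (ec : String) : List String → String
  | [] => ""
  | [element] => if PySem.Str.isIn "-" element then element else "-" ++ ec ++ element
  | x :: y :: rest =>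
      let mid := (x :: y :: rest).length / 2
      pvAltRec ec ((x :: y :: rest).take mid) ++ " " ++ pvAltRec ec ((x :: y :: rest).drop mid)
termination_by xs => xs.length
decreasing_by
  · simp [List.length_take]; omega
  · simp [List.length_drop]; omega

def unmarshalize_py_alt (_strlist : List String) (_echar : String) : String :=
  pvAltRec _echar _strlist

-- ===== PRECONDITION & SPEC =====
def Spec_unmarshalize_py (_strlist : List String) (_echar : String) (out : String) : Prop := out = unmarshalize_py_alt _strlist _echar
instance (_strlist : List String) (_echar : String) (out : String) : Decidable (Spec_unmarshalize_py _strlist _echar out) := by unfold Spec_unmarshalize_py; infer_instance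

-- ===== CLAIM (what is proved, stated in full; the proofs are below) =====
def Claim_equal_unmarshalize_py : Prop := ∀ (_strlist : List String) (_echar : String), Dom_unmarshalize_py _strlist _echar → Spec_unmarshalize_py _strlist _echar (unmarshalize_py _strlist _echar)

-- ===== LEMMAS AND PROOFS =====

-- abbreviation used only in the proofs: the per-element transformation
def pvPiece (ec e : String) : String :=
  if PySem.Str.isIn "-" e then e else "-" ++ ec ++ e

-- the join-with-space characterisation both ports are reduced to
def pvJoined (ec : String) (xs : List String) : String :=
  PySem.Str.join " " (xs.map (pvPiece ec))

theorem strJoin_nil (sep : String) : PySem.Str.join sep [] = "" := by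
  simp [PySem.Str.join, PySem.Chars.join, List.intercalate]

theorem strJoin_singleton (sep t : String) : PySem.Str.join sep [t] = t := by
  simp [PySem.Str.join, PySem.Chars.join, List.intercalate]

theorem strJoin_cons_cons (sep t a : String) (r : List String) :
    PySem.Str.join sep (t :: a :: r) = t ++ sep ++ PySem.Str.join sep (a :: r) := by
  simp [PySem.Str.join, PySem.Chars.join, List.intercalate, String.append_assoc]

theorem strJoin_append (sep : String) :
    ∀ (as bs : List String), as ≠ [] → bs ≠ [] →
    PySem.Str.join sep (as ++ bs) = PySem.Str.join sep as ++ sep ++ PySem.Str.join sep bs := by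
  intro as
  induction as with
  | nil => intro bs h; exact absurd rfl h
  | cons a as' ih =>
    intro bs _ hbs
    cases bs with
    | nil => exact absurd rfl hbs
    | cons b bs' =>
      cases as' with
      | nil => simp [strJoin_singleton, strJoin_cons_cons]
      | cons a2 as2 =>
        have ihh := ih (b :: bs') (by simp) (by simp)
        simp only [List.cons_append] at ihh ⊢
        rw [strJoin_cons_cons sep a a2 (as2 ++ b :: bs'), ihh, strJoin_cons_cons sep a a2 as2]
        simp [String.append_assoc]

-- B's divide-and-conquer recursion computes the join-with-space of the transformed elements
theorem altRec_eq_joined (ec : String) :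
    ∀ (n : Nat) (xs : List String), xs.length ≤ n → pvAltRec ec xs = pvJoined ec xs := by
  intro n
  induction n with
  | zero =>
    intro xs h
    have : xs = [] := by cases xs <;> simp_all
    subst this
    simp [pvAltRec, pvJoined, strJoin_nil]
  | succ m ih =>
    intro xs h
    match xs with
    | [] => simp [pvAltRec, pvJoined, strJoin_nil]
    | [e] => simp [pvAltRec, pvJoined, strJoin_singleton, pvPiece]
    | x :: y :: rest =>
      rw [pvAltRec]
      have hlen : (x :: y :: rest).length = rest.length + 2 := by simp
      have hmid : (x :: y :: rest).length / 2 ≥ 1 ∧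
          (x :: y :: rest).length / 2 ≤ (x :: y :: rest).length - 1 := by
        rw [hlen]; omega
      set L := x :: y :: rest with hL
      set mid := L.length / 2 with hm
      have h1 : (L.take mid).length ≤ m := by
        simp only [List.length_take]
        have : L.length ≤ m + 1 := h
        omega
      have h2 : (L.drop mid).length ≤ m := by
        simp only [List.length_drop]
        have : L.length ≤ m + 1 := h
        omega
      rw [ih _ h1, ih _ h2]
      have htne : (L.take mid) ≠ [] := by
        have : (L.take mid).length ≥ 1 := by
          simp only [List.length_take]; omega
        intro hE; rw [hE] at this; simp at this
      have hdne : (L.drop mid) ≠ [] := by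
        have : (L.drop mid).length ≥ 1 := by
          simp only [List.length_drop]
          have : L.length = rest.length + 2 := hlen
          omega
        intro hE; rw [hE] at this; simp at this
      have : pvJoined ec L = pvJoined ec (L.take mid) ++ " " ++ pvJoined ec (L.drop mid) := by
        unfold pvJoined
        rw [← strJoin_append " " _ _ (by simpa using htne) (by simpa using hdne),
          ← List.map_append, List.take_append_drop]
      rw [this]

theorem alt_eq_joined (ec : String) (xs : List String) :
    unmarshalize_py_alt xs ec = pvJoined ec xs := by
  unfold unmarshalize_py_alt
  exact altRec_eq_joined ec xs.length xs (le_refl _)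

-- A's indexed fold computes the same join-with-space
theorem unmarshalize_loop_eq (ec : String) (n : Int) :
    ∀ (xs : List String) (s : Int) (buf : String), s + (xs.length : Int) = n →
    (PySem.List.enumerate xs s).foldl
      (fun lBuffer ie =>
        if PySem.Str.isIn "-" ie.2 = false then
          if ie.1 < n - 1 then lBuffer ++ ("-" ++ ec ++ ie.2 ++ " ")
          else lBuffer ++ ("-" ++ ec ++ ie.2)
        else
          if ie.1 < n - 1 then lBuffer ++ (ie.2 ++ " ")
          else lBuffer ++ ie.2) buf
    = buf ++ pvJoined ec xs := by
  intro xs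
  induction xs with
  | nil =>
    intro s buf h
    simp [pvJoined, PySem.List.enumerate_nil, strJoin_nil]
  | cons x rest ih =>
    intro s buf h
    rw [PySem.List.enumerate_cons, List.foldl_cons]
    cases rest with
    | nil =>
      have hc : ¬ (s < n - 1) := by simp at h; omega
      by_cases hmem : PySem.Chars.isIn ['-'] x.toList = true <;>
        simp [pvJoined, pvPiece, hmem, hc, strJoin_singleton, PySem.List.enumerate_nil]
    | cons r rs =>
      simp only [List.length_cons] at h
      push_cast at h
      have hc : s < n - 1 := by omega
      have hlen : s + 1 + ((r :: rs).length : Int) = n := by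
        simp only [List.length_cons]; push_cast; omega
      cases hmem : PySem.Str.isIn "-" x with
      | false =>
        rw [if_pos rfl, if_pos hc, ih (s + 1) _ hlen]
        simp at hmem
        simp [pvJoined, pvPiece, hmem, strJoin_cons_cons, String.append_assoc]
      | true =>
        rw [if_neg (by simp), if_pos hc, ih (s + 1) _ hlen]
        simp at hmem
        simp [pvJoined, pvPiece, hmem, strJoin_cons_cons, String.append_assoc]

-- ===== VERDICT (by name: the statement is the Claim_ definition above) =====
theorem unmarshalize_py_spec : Claim_equal_unmarshalize_py := by
  intro l ec _
  unfold Spec_unmarshalize_py unmarshalize_py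
  rw [alt_eq_joined]
  exact unmarshalize_loop_eq ec l.length l 0 "" (by simp)
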